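-- pv_equiv track=rewrite | github.com/obersteiner/sparseSpACE | sparseSpACE/Extrapolation.py | get_grid_with_max_point_count
-- ===== SOURCE A (Python) =====
-- from typing import Sequence, Tuple, Dict, List
--
-- def get_grid_with_max_point_count(grid: Sequence[float], grid_levels: Sequence[int], count: int) -> Sequence[float]:
--     """
--     This method computes a truncated grid with <= count points. Points of a level are only added to the truncated
--     grid if all available points on this level (+ previous points) fit below the point count.
--
--     :param grid: grid points as array
--     :param grid_levels: grid levels as array
--     :param count: maximal point count
--     :return: truncated grid with max. "count" points
--     """
--
--     assert count >= 0
--     assert len(grid) == len(grid_levels)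
--
--     if count >= len(grid):
--         return grid
--
--     current_level = min(grid_levels)
--     current_grid = []
--
--     while True:
--         current_grid_tmp = []
--         for i in range(len(grid)):
--             if grid_levels[i] <= current_level:
--                 current_grid_tmp.append(grid[i])
--
--         if len(current_grid_tmp) > count:
--             return current_grid
--
--         current_grid = current_grid_tmp
--         current_level += 1
-- ===== SOURCE B (Python) =====
-- def get_grid_with_max_point_count(grid, grid_levels, count):
--     assert count >= 0
--     assert len(grid) == len(grid_levels)
--
--     if count >= len(grid):
--         return grid
--
--     counts = {}
--     for l in grid_levels:
--         counts[l] = counts.get(l, 0) + 1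
--
--     cum = 0
--     threshold = None
--     for level in sorted(counts):
--         c = cum + counts[level]
--         if c > count:
--             break
--         cum = c
--         threshold = level
--
--     if threshold is None:
--         return []
--     return [x for x, l in zip(grid, grid_levels) if l <= threshold]
-- ===== Notes on version B (the rewrite author's own statement) =====
-- stated objective: faster
-- what changed: Instead of re-filtering the whole grid once per candidate level (A's while-loop), B counts points per level in one dict pass, scans the sorted distinct levels once to find the threshold level, and filters the grid in a single final pass.
import Mathlib
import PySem

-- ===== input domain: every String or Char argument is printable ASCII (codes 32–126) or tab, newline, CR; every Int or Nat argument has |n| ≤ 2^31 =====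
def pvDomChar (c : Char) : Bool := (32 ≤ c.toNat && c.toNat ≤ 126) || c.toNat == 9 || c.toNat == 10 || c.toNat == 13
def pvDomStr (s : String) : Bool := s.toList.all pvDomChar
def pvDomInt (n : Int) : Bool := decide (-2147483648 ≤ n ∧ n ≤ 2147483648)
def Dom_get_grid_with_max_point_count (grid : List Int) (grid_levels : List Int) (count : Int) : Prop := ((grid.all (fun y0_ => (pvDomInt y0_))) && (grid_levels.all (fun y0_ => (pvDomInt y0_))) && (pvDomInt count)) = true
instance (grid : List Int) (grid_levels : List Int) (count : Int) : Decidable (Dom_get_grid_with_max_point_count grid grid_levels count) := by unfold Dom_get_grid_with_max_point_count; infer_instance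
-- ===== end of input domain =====

-- B replaces A's repeated whole-grid filtering per candidate level by one per-level count dict,
-- one scan of the sorted distinct levels to find the threshold level, and one final filtering pass.

-- ===== PORT A =====
-- A's 'while True' loop; fuel only makes it total (the loop provably returns before level reaches max(grid_levels)+1)
def pvALoop (grid : List Int) (grid_levels : List Int) (count : Int) : Nat → Int → List Int → List Int
  | 0, _, cur => cur
  | fuel+1, level, cur =>
    let tmp := (PySem.List.pyRange 0 (grid.length : Int) 1).foldl
      (fun acc i => if PySem.List.pyGetD grid_levels i 0 ≤ level then acc ++ [PySem.List.pyGetD grid i 0] else acc) []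
    if (tmp.length : Int) > count then cur
    else pvALoop grid grid_levels count fuel (level + 1) tmp

def get_grid_with_max_point_count (grid : List Int) (grid_levels : List Int) (count : Int) : List Int :=
  if count ≥ (grid.length : Int) then grid
  else
    pvALoop grid grid_levels count
      ((((PySem.List.max? grid_levels (fun x => x)).getD 0) - ((PySem.List.min? grid_levels (fun x => x)).getD 0)).toNat + 2)
      ((PySem.List.min? grid_levels (fun x => x)).getD 0) []

-- ===== PORT B =====
-- B's scan of the sorted distinct levels: accumulate counts, remember the last level that still fits
def pvBLoop (counts : PySem.Dict Int Int) (count : Int) : List Int → Int → Option Int → Option Int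
  | [], _, th => th
  | l :: rest, cum, th =>
    let c := cum + counts.getD l 0
    if c > count then th
    else pvBLoop counts count rest c (some l)

def get_grid_with_max_point_count_alt (grid : List Int) (grid_levels : List Int) (count : Int) : List Int :=
  if count ≥ (grid.length : Int) then grid
  else
    let counts : PySem.Dict Int Int := grid_levels.foldl (fun d l => d.insert l (d.getD l 0 + 1)) PySem.Dict.empty
    match pvBLoop counts count (PySem.List.sorted counts.keys (fun x => x) false) 0 none with
    | none => []
    | some t => ((grid.zip grid_levels).filter (fun p => p.2 ≤ t)).map Prod.fst

-- ===== PRECONDITION & SPEC =====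
-- A asserts count >= 0 and len(grid) == len(grid_levels); Pre_ is exactly those inputs.
def Pre_get_grid_with_max_point_count (grid : List Int) (grid_levels : List Int) (count : Int) : Prop :=
  0 ≤ count ∧ grid.length = grid_levels.length
instance (grid : List Int) (grid_levels : List Int) (count : Int) : Decidable (Pre_get_grid_with_max_point_count grid grid_levels count) := by unfold Pre_get_grid_with_max_point_count; infer_instance

def pvWitness_get_grid_with_max_point_count : List Int × List Int × Int := ([10, 20, 30], [1, 2, 1], 2)

def Spec_get_grid_with_max_point_count (grid : List Int) (grid_levels : List Int) (count : Int) (out : List Int) : Prop := out = get_grid_with_max_point_count_alt grid grid_levels count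
instance (grid : List Int) (grid_levels : List Int) (count : Int) (out : List Int) : Decidable (Spec_get_grid_with_max_point_count grid grid_levels count out) := by unfold Spec_get_grid_with_max_point_count; infer_instance

-- ===== CLAIM (what is proved, stated in full; the proofs are below) =====
def Claim_equal_get_grid_with_max_point_count : Prop := ∀ (grid : List Int) (grid_levels : List Int) (count : Int), Dom_get_grid_with_max_point_count grid grid_levels count → Pre_get_grid_with_max_point_count grid grid_levels count → Spec_get_grid_with_max_point_count grid grid_levels count (get_grid_with_max_point_count grid grid_levels count)

-- ===== LEMMAS AND PROOFS =====

-- the points of grid whose level is ≤ t, and how many levels are ≤ t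
def pvF (grid gl : List Int) (t : Int) : List Int :=
  ((grid.zip gl).filter (fun p => p.2 ≤ t)).map Prod.fst
def pvCnt (gl : List Int) (t : Int) : Nat := (gl.filter (fun l => l ≤ t)).length

theorem pvF_length (grid gl : List Int) (t : Int) (h : grid.length = gl.length) :
    (pvF grid gl t).length = pvCnt gl t := by
  induction grid generalizing gl with
  | nil =>
    cases gl with
    | nil => simp [pvF, pvCnt]
    | cons b bs => simp at h
  | cons a as ih =>
    cases gl with
    | nil => simp at h
    | cons b bs =>
      simp only [List.length_cons, Nat.add_right_cancel_iff] at h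
      simp only [pvF, pvCnt, List.zip_cons_cons, List.filter_cons]
      split
      · simpa [pvF, pvCnt] using ih bs h
      · simpa [pvF, pvCnt] using ih bs h

theorem pvCnt_mono (gl : List Int) {t t' : Int} (h : t ≤ t') : pvCnt gl t ≤ pvCnt gl t' := by
  induction gl with
  | nil => simp [pvCnt]
  | cons a as ih =>
    simp only [pvCnt, List.filter_cons] at *
    split_ifs with h1 h2 h2 <;> simp_all <;> omega

theorem pvCnt_congr (gl : List Int) {t t' : Int} (h : ∀ l ∈ gl, l ≤ t ↔ l ≤ t') :
    pvCnt gl t = pvCnt gl t' := by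
  unfold pvCnt
  rw [List.filter_congr]
  intro l hl
  simpa using h l hl

theorem pvCnt_split (gl : List Int) {t k : Int} (h : t < k) (hgap : ∀ l ∈ gl, l ≤ t ∨ k ≤ l) :
    pvCnt gl k = pvCnt gl t + gl.count k := by
  induction gl with
  | nil => simp [pvCnt]
  | cons a as ih =>
    have ha := hgap a (by simp)
    have ih' := ih (fun l hl => hgap l (by simp [hl]))
    simp only [pvCnt, List.count_cons] at *
    simp only [List.filter_cons]
    split_ifs <;> simp_all <;> omega

theorem pvCnt_eq_count (gl : List Int) {k : Int} (h : ∀ l ∈ gl, k ≤ l) :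
    pvCnt gl k = gl.count k := by
  induction gl with
  | nil => simp [pvCnt]
  | cons a as ih =>
    have ha := h a (by simp)
    have ih' := ih (fun l hl => h l (by simp [hl]))
    simp only [pvCnt, List.count_cons] at *
    simp only [List.filter_cons]
    split_ifs <;> simp_all <;> omega

theorem pvCnt_zero (gl : List Int) {k : Int} (h : ∀ l ∈ gl, k < l) : pvCnt gl k = 0 := by
  unfold pvCnt
  rw [List.filter_eq_nil_iff.mpr]
  · rfl
  · intro l hl
    simpa using not_le.mpr (h l hl)

theorem pvCnt_full (gl : List Int) {k : Int} (h : ∀ l ∈ gl, l ≤ k) : pvCnt gl k = gl.length := by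
  unfold pvCnt
  rw [List.filter_eq_self.mpr]
  intro l hl
  simpa using h l hl

theorem pvF_congr (grid gl : List Int) {t t' : Int} (h : ∀ l ∈ gl, l ≤ t ↔ l ≤ t') :
    pvF grid gl t = pvF grid gl t' := by
  unfold pvF
  congr 1
  rw [List.filter_congr]
  intro p hp
  simpa using h p.2 (List.of_mem_zip hp).2

theorem pvF_nil (grid gl : List Int) {t : Int} (hlen : grid.length = gl.length)
    (h : ∀ l ∈ gl, t < l) : pvF grid gl t = [] := by
  have hl := pvF_length grid gl t hlen
  rw [pvCnt_zero gl h] at hl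
  exact List.length_eq_zero_iff.mp hl

theorem pvTmp_eq (grid gl : List Int) (L : Int) (hlen : grid.length = gl.length) :
    (PySem.List.pyRange 0 (grid.length : Int) 1).foldl
      (fun acc i => if PySem.List.pyGetD gl i 0 ≤ L then acc ++ [PySem.List.pyGetD grid i 0] else acc) []
    = pvF grid gl L := by
  have hz : (grid.zip gl).length = grid.length := by simp [hlen]
  have step1 : (PySem.List.pyRange 0 (grid.length : Int) 1).foldl
      (fun acc i => if PySem.List.pyGetD gl i 0 ≤ L then acc ++ [PySem.List.pyGetD grid i 0] else acc) []
      = (PySem.List.pyRange 0 (grid.length : Int) 1).foldl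
      (fun acc i => (fun (acc : List Int) (p : Int × Int) => if p.2 ≤ L then acc ++ [p.1] else acc)
        acc (PySem.List.pyGetD (grid.zip gl) i (0, 0))) [] := by
    apply PySem.List.foldl_congr_mem
    intro acc i hi
    rw [PySem.List.mem_pyRange_one] at hi
    have hi1 : 0 ≤ i := hi.1
    have hi2 : i < (grid.length : Int) := hi.2
    rw [PySem.List.pyGetD_eq_getElem gl 0 hi1 (by omega),
        PySem.List.pyGetD_eq_getElem grid 0 hi1 (by omega),
        PySem.List.pyGetD_eq_getElem (grid.zip gl) (0, 0) hi1 (by omega)]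
    simp [List.getElem_zip]
  rw [step1]
  have hz' : (grid.length : Int) = ((grid.zip gl).length : Int) := by rw [hz]
  rw [hz']
  rw [PySem.List.foldl_pyRange_zero_pyGetD' (grid.zip gl) (0, 0)
    (fun (acc : List Int) (p : Int × Int) => if p.2 ≤ L then acc ++ [p.1] else acc) []]
  rw [PySem.List.foldl_append_ite (fun (p : Int × Int) => p.2 ≤ L) Prod.fst]
  simp [pvF]

theorem pvALoop_eq (grid gl : List Int) (count T : Int) (hlen : grid.length = gl.length)
    (hTg : (pvCnt gl T : Int) ≤ count) (hTb : count < (pvCnt gl (T + 1) : Int)) :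
    ∀ (fuel : Nat) (level : Int), level ≤ T + 1 → (T + 1 - level).toNat < fuel →
    pvALoop grid gl count fuel level (pvF grid gl (level - 1)) = pvF grid gl T := by
  intro fuel
  induction fuel with
  | zero => intro level _ hf; omega
  | succ fuel ih =>
    intro level hle hf
    simp only [pvALoop]
    rw [pvTmp_eq grid gl level hlen, pvF_length grid gl level hlen]
    by_cases hc : ((pvCnt gl level : Int) > count)
    · rw [if_pos hc]
      have hlev : level = T + 1 := by
        by_contra hne
        have h1 : level ≤ T := by omega
        have := pvCnt_mono gl h1
        omega
      have hT : level - 1 = T := by omega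
      rw [hT]
    · rw [if_neg hc]
      have h1 : level ≤ T := by
        by_contra hgt
        have h2 : T + 1 ≤ level := by omega
        have := pvCnt_mono gl h2
        omega
      have hres := ih (level + 1) (by omega) (by omega)
      have hsub : level + 1 - 1 = level := by ring
      rw [hsub] at hres
      exact hres

theorem pvGetD_fold (xs : List Int) (d : PySem.Dict Int Int) (x : Int) :
    (xs.foldl (fun d l => d.insert l (d.getD l 0 + 1)) d).getD x 0 = d.getD x 0 + (xs.count x : Int) := by
  induction xs generalizing d with
  | nil => simp
  | cons a as ih =>
    simp only [List.foldl_cons, ih, List.count_cons]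
    rw [PySem.Dict.getD_insert]
    by_cases h : x = a
    · subst h
      simp
      omega
    · have hba : ¬ a = x := fun e => h e.symm
      simp [h, hba]

theorem pvMem_keys_fold (xs : List Int) (d : PySem.Dict Int Int) (x : Int)
    (hx : x ∈ d.keys ∨ x ∈ xs) :
    x ∈ (xs.foldl (fun d l => d.insert l (d.getD l 0 + 1)) d).keys := by
  induction xs generalizing d with
  | nil => simpa using hx
  | cons a as ih =>
    simp only [List.foldl_cons]
    apply ih
    rcases hx with h | h
    · exact Or.inl ((PySem.Dict.mem_keys_insert _ _ _ _).mpr (Or.inr h))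
    · rcases List.mem_cons.mp h with h | h
      · exact Or.inl ((PySem.Dict.mem_keys_insert _ _ _ _).mpr (Or.inl h))
      · exact Or.inr h

theorem pvBLoop_post (grid gl : List Int) (count : Int) (counts : PySem.Dict Int Int)
    (hlen : grid.length = gl.length) (h0 : 0 ≤ count) (hlt : count < (gl.length : Int))
    (hcnt : ∀ l, counts.getD l 0 = (gl.count l : Int)) :
    ∀ (ks : List Int) (cum : Int) (th : Option Int),
    ks.Pairwise (· < ·) →
    (match th with
     | none => cum = 0 ∧ ∀ l ∈ gl, l ∈ ks
     | some t => cum = (pvCnt gl t : Int) ∧ (pvCnt gl t : Int) ≤ count ∧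
         (∀ l ∈ gl, l ≤ t ∨ l ∈ ks) ∧ (∀ l ∈ ks, t < l)) →
    ∃ T : Int, (pvCnt gl T : Int) ≤ count ∧ count < (pvCnt gl (T + 1) : Int) ∧
      (match pvBLoop counts count ks cum th with
       | none => pvF grid gl T = []
       | some t => pvF grid gl t = pvF grid gl T) := by
  intro ks
  induction ks with
  | nil =>
    intro cum th _ hinv
    exfalso
    cases th with
    | none =>
      obtain ⟨-, hall⟩ := hinv
      have hgl : gl = [] := List.eq_nil_iff_forall_not_mem.mpr (fun l hl => by simpa using hall l hl)
      rw [hgl] at hlt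
      simp at hlt
      omega
    | some t =>
      obtain ⟨-, hle, hall, -⟩ := hinv
      have hfull : pvCnt gl t = gl.length := by
        apply pvCnt_full
        intro l hl
        rcases hall l hl with h | h
        · exact h
        · simp at h
      rw [hfull] at hle
      omega
  | cons k rest ih =>
    intro cum th hpw hinv
    have hpw' := List.pairwise_cons.mp hpw
    simp only [pvBLoop, hcnt k]
    cases th with
    | none =>
      obtain ⟨hcum, hall⟩ := hinv
      have hge : ∀ l ∈ gl, k ≤ l := by
        intro l hl
        rcases List.mem_cons.mp (hall l hl) with h | h
        · omega
        · exact le_of_lt (hpw'.1 l h)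
      have hck : (pvCnt gl k : Int) = cum + (gl.count k : Int) := by
        rw [pvCnt_eq_count gl hge, hcum]
        omega
      by_cases hbr : cum + (gl.count k : Int) > count
      · rw [if_pos hbr]
        refine ⟨k - 1, ?_, ?_, ?_⟩
        · have hz : pvCnt gl (k - 1) = 0 :=
            pvCnt_zero gl (fun l hl => by have := hge l hl; omega)
          omega
        · have hk1 : k - 1 + 1 = k := by omega
          rw [hk1]
          omega
        · exact pvF_nil grid gl hlen (fun l hl => by have := hge l hl; omega)
      · rw [if_neg hbr]
        refine ih _ _ hpw'.2 ?_
        refine ⟨by omega, by omega, ?_, hpw'.1⟩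
        intro l hl
        rcases List.mem_cons.mp (hall l hl) with h | h
        · exact Or.inl (le_of_eq h)
        · exact Or.inr h
    | some t =>
      obtain ⟨hcum, hle, hall, hrest⟩ := hinv
      have htk : t < k := hrest k (by simp)
      have hgap : ∀ l ∈ gl, l ≤ t ∨ k ≤ l := by
        intro l hl
        rcases hall l hl with h | h
        · exact Or.inl h
        · rcases List.mem_cons.mp h with h | h
          · omega
          · exact Or.inr (le_of_lt (hpw'.1 l h))
      have hck : (pvCnt gl k : Int) = cum + (gl.count k : Int) := by
        rw [pvCnt_split gl htk hgap, hcum]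
        push_cast
        omega
      by_cases hbr : cum + (gl.count k : Int) > count
      · rw [if_pos hbr]
        refine ⟨k - 1, ?_, ?_, ?_⟩
        · have heq : pvCnt gl (k - 1) = pvCnt gl t := by
            apply pvCnt_congr
            intro l hl
            rcases hgap l hl with h | h
            · constructor <;> intro <;> omega
            · constructor <;> intro <;> omega
          omega
        · have hk1 : k - 1 + 1 = k := by omega
          rw [hk1]
          omega
        · apply pvF_congr
          intro l hl
          rcases hgap l hl with h | h
          · constructor <;> intro <;> omega
          · constructor <;> intro <;> omega
      · rw [if_neg hbr]
        refine ih _ _ hpw'.2 ?_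
        refine ⟨by omega, by omega, ?_, hpw'.1⟩
        intro l hl
        rcases hall l hl with h | h
        · exact Or.inl (by omega)
        · rcases List.mem_cons.mp h with h2 | h2
          · exact Or.inl (le_of_eq h2)
          · exact Or.inr h2

theorem pvB_else_eq (grid gl : List Int) (count : Int) (counts : PySem.Dict Int Int) (S : List Int)
    (T : Int)
    (hres : match pvBLoop counts count S 0 none with
      | none => pvF grid gl T = []
      | some t => pvF grid gl t = pvF grid gl T) :
    pvF grid gl T = (match pvBLoop counts count S 0 none with
      | none => []
      | some t => ((grid.zip gl).filter (fun p => p.2 ≤ t)).map Prod.fst) := by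
  cases h : pvBLoop counts count S 0 none with
  | none =>
    rw [h] at hres
    exact hres
  | some t =>
    rw [h] at hres
    exact hres.symm

-- ===== VERDICT (by name: the statement is the Claim_ definition above) =====
theorem get_grid_with_max_point_count_spec : Claim_equal_get_grid_with_max_point_count := by
  intro grid gl count _ hPre
  obtain ⟨h0, hlen⟩ := hPre
  unfold Spec_get_grid_with_max_point_count
  unfold get_grid_with_max_point_count get_grid_with_max_point_count_alt
  by_cases hbig : count ≥ (grid.length : Int)
  · rw [if_pos hbig, if_pos hbig]
  · rw [if_neg hbig, if_neg hbig]
    simp only []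
    have hlt : count < (grid.length : Int) := by omega
    have hlt' : count < (gl.length : Int) := by rw [← hlen]; exact hlt
    have hne : gl ≠ [] := by
      intro h
      rw [h] at hlen
      simp at hlen
      rw [hlen] at hlt
      simp at hlt
      omega
    set counts : PySem.Dict Int Int := gl.foldl (fun d l => d.insert l (d.getD l 0 + 1)) PySem.Dict.empty with hcounts
    have hcnt : ∀ l, counts.getD l 0 = (gl.count l : Int) := by
      intro l
      rw [hcounts, pvGetD_fold]
      simp
    have hnodupk : counts.keys.Nodup := by
      rw [hcounts]
      exact PySem.Dict.nodup_keys_foldl_insert gl (fun d x => d.getD x 0 + 1) PySem.Dict.empty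
        PySem.Dict.nodup_keys_empty
    set S := PySem.List.sorted counts.keys (fun x => x) false with hS
    have hSpw : S.Pairwise (· < ·) := by
      have h1 : S.Pairwise (fun a b => a ≤ b) := by
        simpa using PySem.List.sorted_pairwise counts.keys (fun x => x)
      have h2 : S.Nodup := ((PySem.List.sorted_perm counts.keys (fun x => x) false).nodup_iff).mpr hnodupk
      exact (h1.and h2).imp (fun h => lt_of_le_of_ne h.1 h.2)
    have hSmem : ∀ l ∈ gl, l ∈ S := by
      intro l hl
      rw [hS, PySem.List.mem_sorted]
      exact pvMem_keys_fold gl PySem.Dict.empty l (Or.inr hl)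
    obtain ⟨T, hTg, hTb, hres⟩ := pvBLoop_post grid gl count counts hlen h0 hlt' hcnt S 0 none
      hSpw ⟨rfl, hSmem⟩
    obtain ⟨m, hm⟩ : ∃ m, PySem.List.min? gl (fun x => x) = some m := by
      cases h : PySem.List.min? gl (fun x => x) with
      | none => exact absurd ((PySem.List.min?_eq_none_iff gl (fun x => x)).mp h) hne
      | some m => exact ⟨m, rfl⟩
    obtain ⟨M, hM⟩ : ∃ M, PySem.List.max? gl (fun x => x) = some M := by
      cases h : PySem.List.max? gl (fun x => x) with
      | none => exact absurd ((PySem.List.max?_eq_none_iff gl (fun x => x)).mp h) hne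
      | some M => exact ⟨M, rfl⟩
    have hmmin : ∀ l ∈ gl, m ≤ l := by
      intro l hl
      simpa using PySem.List.min?_isMin hm l hl
    have hMmax : ∀ l ∈ gl, l ≤ M := by
      intro l hl
      simpa using PySem.List.max?_isMax hM l hl
    have hnil : pvF grid gl (m - 1) = [] :=
      pvF_nil grid gl hlen (fun l hl => by have := hmmin l hl; omega)
    have hT1 : m ≤ T + 1 := by
      by_contra hcon
      have hz : pvCnt gl (T + 1) = 0 :=
        pvCnt_zero gl (fun l hl => by have := hmmin l hl; omega)
      omega
    have hTM : T + 1 ≤ M := by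
      by_contra hcon
      have hfull : pvCnt gl M = gl.length := pvCnt_full gl hMmax
      have hmono : pvCnt gl M ≤ pvCnt gl T := pvCnt_mono gl (by omega)
      omega
    have hA : pvALoop grid gl count ((M - m).toNat + 2) m [] = pvF grid gl T := by
      have hloop := pvALoop_eq grid gl count T hlen hTg hTb ((M - m).toNat + 2) m hT1 (by omega)
      rw [hnil] at hloop
      exact hloop
    rw [hm, hM]
    simp only [Option.getD_some]
    rw [hA]
    exact pvB_else_eq grid gl count _ _ T hres
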